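-- pv_equiv track=rewrite | github.com/wdi2020/wdi_python | cwiczenia2020/Cwiczenia 3/cw16.py | czy_jes_naj
-- ===== SOURCE A (Python) =====
-- def czy_jes_naj(t):
--     mmin = t[0]
--     count_min = 1
--     mmax = t[0]
--     count_max = 1
--     i = 1
--     while i < len(t):
--         if t[i] < mmin:
--             mmin = t[i]
--             count_min = 1
--         elif t[i] == mmin:
--             count_min += 1
--
--         if t[i] > mmax:
--             mmax =  t[i]
--             count_max = 1
--         elif t[i] == mmax:
--             count_max += 1
--         i+=1
--
--     return count_max == 1 and count_min == 1
-- ===== SOURCE B (Python) =====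
-- def czy_jes_naj(t):
--     return t.count(max(t)) == 1 and t.count(min(t)) == 1
-- ===== Notes on version B (the rewrite author's own statement) =====
-- stated objective: idiomatic
-- what changed: Replaces the manual single-pass min/max/count tracking loop with idiomatic builtin max/min plus list.count scans (C-implemented builtins instead of an interpreted loop).
import Mathlib
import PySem

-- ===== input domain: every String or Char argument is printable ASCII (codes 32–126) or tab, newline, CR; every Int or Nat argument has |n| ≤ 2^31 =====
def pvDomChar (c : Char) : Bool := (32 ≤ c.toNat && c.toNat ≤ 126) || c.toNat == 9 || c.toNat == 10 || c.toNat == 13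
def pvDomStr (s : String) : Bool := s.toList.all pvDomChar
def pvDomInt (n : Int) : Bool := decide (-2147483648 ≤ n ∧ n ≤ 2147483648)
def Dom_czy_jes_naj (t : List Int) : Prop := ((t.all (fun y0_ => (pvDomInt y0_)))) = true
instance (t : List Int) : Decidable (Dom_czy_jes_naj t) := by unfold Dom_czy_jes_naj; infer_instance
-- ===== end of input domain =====

-- B replaces A's manual single-pass min/max/count tracking loop with idiomatic builtin max/min plus count scans (idiomatic; a timing run measured B faster by a constant factor).

-- ===== PORT A =====
-- one iteration of A's while loop body: state (mmin, count_min, mmax, count_max)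
def czyStep (s : Int × Int × Int × Int) (x : Int) : Int × Int × Int × Int :=
  match s with
  | (mn, cn, mx, cx) =>
    (if x < mn then x else mn,
     if x < mn then (1 : Int) else if x = mn then cn + 1 else cn,
     if mx < x then x else mx,
     if mx < x then (1 : Int) else if x = mx then cx + 1 else cx)

def czy_jes_naj (t : List Int) : Bool :=
  match t with
  | [] => false   -- Python: t[0] raises IndexError; excluded by Pre_
  | h :: rest =>
    match rest.foldl czyStep (h, 1, h, 1) with
    | (_, cn, _, cx) => cx == 1 && cn == 1

-- ===== PORT B =====
def czy_jes_naj_alt (t : List Int) : Bool :=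
  match PySem.List.max? t (fun y => y), PySem.List.min? t (fun y => y) with
  | some M, some m => (PySem.List.count t M == 1) && (PySem.List.count t m == 1)
  | _, _ => false   -- Python: max([]) raises ValueError; excluded by Pre_

-- ===== PRECONDITION & SPEC =====
-- A raises IndexError on the empty list (t[0]); B raises ValueError there (max of empty sequence).
def Pre_czy_jes_naj (t : List Int) : Prop := t ≠ []
instance (t : List Int) : Decidable (Pre_czy_jes_naj t) := by unfold Pre_czy_jes_naj; infer_instance

def pvWitness_czy_jes_naj : List Int := ([3, 1, 2])

def Spec_czy_jes_naj (t : List Int) (out : Bool) : Prop := out = czy_jes_naj_alt t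
instance (t : List Int) (out : Bool) : Decidable (Spec_czy_jes_naj t out) := by unfold Spec_czy_jes_naj; infer_instance

-- ===== CLAIM (what is proved, stated in full; the proofs are below) =====
def Claim_equal_czy_jes_naj : Prop := ∀ (t : List Int), Dom_czy_jes_naj t → Pre_czy_jes_naj t → Spec_czy_jes_naj t (czy_jes_naj t)

-- ===== LEMMAS AND PROOFS =====

-- invariant of A's loop: after folding, the state holds the running min/max of the
-- processed elements together with their multiplicities (relative to the start state)
lemma czy_fold_spec (xs : List Int) : ∀ (mn cn mx cx : Int),
    xs.foldl czyStep (mn, cn, mx, cx) =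
      (xs.foldl min mn,
       (if xs.foldl min mn = mn then cn else 0) + (xs.count (xs.foldl min mn) : Int),
       xs.foldl max mx,
       (if xs.foldl max mx = mx then cx else 0) + (xs.count (xs.foldl max mx) : Int)) := by
  induction xs with
  | nil => intro mn cn mx cx; simp
  | cons x rest ih =>
    intro mn cn mx cx
    have e1 : (if x < mn then x else mn) = min mn x := by rw [min_def]; split <;> split <;> omega
    have e2 : (if mx < x then x else mx) = max mx x := by rw [max_def]; split <;> split <;> omega
    have hmn := (PySem.List.foldl_min_le rest (min mn x)).1
    have hmx := (PySem.List.le_foldl_max rest (max mx x)).1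
    simp only [List.foldl_cons, czyStep, e1, e2, ih, List.count_cons, Prod.mk.injEq,
      true_and]
    refine ⟨?_, ?_⟩ <;>
      · split_ifs <;> simp only [beq_iff_eq] at * <;> push_cast <;> omega

-- ===== VERDICT (by name: the statement is the Claim_ definition above) =====
theorem czy_jes_naj_spec : Claim_equal_czy_jes_naj := by
  intro t _ hpre
  unfold Spec_czy_jes_naj
  match t, hpre with
  | h :: rest, _ =>
    simp only [czy_jes_naj, czy_jes_naj_alt, czy_fold_spec,
      PySem.List.max?_id_cons, PySem.List.min?_id_cons, PySem.List.count_eq, List.count_cons]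
    rw [Bool.eq_iff_iff]
    simp only [Bool.and_eq_true, beq_iff_eq]
    constructor <;> intro ⟨h1, h2⟩ <;> constructor <;> split_ifs at * <;> omega
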